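-- pv_equiv track=rewrite | github.com/samsonlarsson/CodeCademy_py_Scripts | Practise_Makes_Perfect/testcount.py | manipulate_data
-- ===== SOURCE A (Python) =====
-- def manipulate_data(list_):
--     newlist = []
--     new = []
--     count = 0
--     add = []
--     for item in list_:
--         if item >= 0:
--           count += 1
--           newlist.append(count)
--         if item < 0:
--           add.append(item)
--           newlist.append(sum(add))
--     return newlist
-- ===== SOURCE B (Python) =====
-- def manipulate_data(list_):
--     # Pass 1: prefix table of running counts of non-negative elements.
--     counts = []
--     c = 0
--     for x in list_:
--         if x >= 0:
--             c += 1
--         counts.append(c)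
--     # Pass 2: prefix table of running sums of negative elements (in input order).
--     negs = []
--     s = 0
--     for x in list_:
--         if x < 0:
--             s += x
--         negs.append(s)
--     # Pass 3: select the right table entry per position.
--     return [ci if x >= 0 else si for x, ci, si in zip(list_, counts, negs)]
-- ===== Notes on version B (the rewrite author's own statement) =====
-- stated objective: faster
-- what changed: Replaces the single interleaved stateful loop (running count, growing list of negatives re-summed each time) with three independent passes: build a prefix-count table and a prefix-negative-sum table, then select per position; the O(n^2) re-summation of the negatives list disappears.
import Mathlib
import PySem

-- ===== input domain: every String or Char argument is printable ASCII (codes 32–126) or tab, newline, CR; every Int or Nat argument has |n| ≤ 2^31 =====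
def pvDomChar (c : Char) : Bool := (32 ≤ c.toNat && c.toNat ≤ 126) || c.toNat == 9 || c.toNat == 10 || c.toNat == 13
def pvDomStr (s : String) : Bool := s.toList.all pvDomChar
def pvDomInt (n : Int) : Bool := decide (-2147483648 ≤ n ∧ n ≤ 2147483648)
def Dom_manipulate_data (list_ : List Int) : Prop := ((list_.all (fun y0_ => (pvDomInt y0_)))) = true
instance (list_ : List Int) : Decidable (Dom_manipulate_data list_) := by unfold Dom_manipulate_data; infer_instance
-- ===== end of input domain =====

-- B replaces A's interleaved loop (which re-sums the growing negatives list each step, O(n^2)) with two prefix tables and a selection pass, O(n).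
-- ===== PORT A =====
-- A: one stateful loop carrying (newlist, count, add); on item<0 it appends item to add and re-sums add.
-- one iteration of A's loop body
def mdStep (st : List Int × Int × List Int) (item : Int) : List Int × Int × List Int :=
  let newlist := st.1
  let count := st.2.1
  let add := st.2.2
  let p := if item ≥ 0 then (newlist ++ [count + 1], count + 1) else (newlist, count)
  let q := if item < 0 then
    (let add' := add ++ [item]; (p.1 ++ [add'.sum], add'))
  else (p.1, add)
  (q.1, p.2, q.2)

def manipulate_data (list_ : List Int) : List Int :=
  (list_.foldl mdStep ([], 0, [])).1

-- ===== PORT B =====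
-- B: pass 1 — prefix table of running counts of non-negatives
def mdCounts : List Int → Int → List Int
  | [], _ => []
  | x :: xs, c =>
    let c' := if x ≥ 0 then c + 1 else c
    c' :: mdCounts xs c'

-- B: pass 2 — prefix table of running sums of negatives
def mdNegs : List Int → Int → List Int
  | [], _ => []
  | x :: xs, s =>
    let s' := if x < 0 then s + x else s
    s' :: mdNegs xs s'

-- B: pass 3 — select counts[i] when list_[i] ≥ 0 else negs[i]
def manipulate_data_alt (list_ : List Int) : List Int :=
  (list_.zip ((mdCounts list_ 0).zip (mdNegs list_ 0))).map
    (fun t => if t.1 ≥ 0 then t.2.1 else t.2.2)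

-- ===== PRECONDITION & SPEC =====
def Spec_manipulate_data (list_ : List Int) (out : List Int) : Prop := out = manipulate_data_alt list_
instance (list_ : List Int) (out : List Int) : Decidable (Spec_manipulate_data list_ out) := by unfold Spec_manipulate_data; infer_instance

-- ===== CLAIM (what is proved, stated in full; the proofs are below) =====
def Claim_equal_manipulate_data : Prop := ∀ (list_ : List Int), Dom_manipulate_data list_ → Spec_manipulate_data list_ (manipulate_data list_)

-- ===== LEMMAS AND PROOFS =====
-- common selector: what both programs produce from a start count c and start negative-sum s
def mdSel : List Int → Int → Int → List Int
  | [], _, _ => []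
  | x :: xs, c, s =>
    if x ≥ 0 then (c + 1) :: mdSel xs (c + 1) s
    else (s + x) :: mdSel xs c (s + x)

theorem mdA_eq (xs : List Int) : ∀ (nl : List Int) (c : Int) (add : List Int),
    (xs.foldl mdStep (nl, c, add)).1 = nl ++ mdSel xs c add.sum := by
  induction xs with
  | nil => intro nl c add; simp [mdSel]
  | cons x xs ih =>
    intro nl c add
    by_cases h : x ≥ 0
    · have h2 : ¬ x < 0 := by omega
      have hs : mdStep (nl, c, add) x = (nl ++ [c + 1], c + 1, add) := by
        simp [mdStep, h, h2]
      simp only [List.foldl_cons, hs, ih, mdSel, if_pos h]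
      simp
    · have h2 : x < 0 := by omega
      have hs : mdStep (nl, c, add) x = (nl ++ [add.sum + x], c, add ++ [x]) := by
        simp [mdStep, h, h2]
      simp only [List.foldl_cons, hs, ih, mdSel, if_neg h]
      simp [add_comm]

theorem mdB_eq (xs : List Int) : ∀ (c s : Int),
    (xs.zip ((mdCounts xs c).zip (mdNegs xs s))).map
      (fun t => if t.1 ≥ 0 then t.2.1 else t.2.2) = mdSel xs c s := by
  induction xs with
  | nil => intro c s; simp [mdCounts, mdNegs, mdSel]
  | cons x xs ih =>
    intro c s
    by_cases h : x ≥ 0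
    · have h2 : ¬ x < 0 := by omega
      simp [mdCounts, mdNegs, mdSel, h, h2, ih]
    · have h2 : x < 0 := by omega
      simp [mdCounts, mdNegs, mdSel, h, h2, ih, add_comm]

-- ===== VERDICT (by name: the statement is the Claim_ definition above) =====
theorem manipulate_data_spec : Claim_equal_manipulate_data := by
  intro list_ _
  unfold Spec_manipulate_data manipulate_data manipulate_data_alt
  rw [mdA_eq, mdB_eq]
  simp
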